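-- pv_equiv track=rewrite | github.com/lithp/kademlia | core.py | _i_centered_indexes
-- ===== SOURCE A (Python) =====
-- import typing
--
-- def _i_centered_indexes(i: int, length: int) -> typing.Iterator[int]:
--     'Generates a permutation of range(length)'
--     assert(length > 0)
--     yield (i,)
--     width = 1
--     while True:
--         to_return = tuple()
--         if (i-width) >= 0:
--             to_return += (i-width,)
--         if (i+width) < length:
--             to_return += (i+width,)
--
--         if len(to_return):
--             yield to_return
--         else:
--             break
--         width += 1
-- ===== SOURCE B (Python) =====
-- import typing
--
-- def _i_centered_indexes(i: int, length: int) -> typing.Iterator[int]: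
--     'Generates a permutation of range(length)'
--     assert(length > 0)
--     yield (i,)
--     lo = min(i, length - 1 - i)
--     hi = max(i, length - 1 - i)
--     # phase 1: both sides in range -> pairs
--     for w in range(1, lo + 1):
--         yield (i - w, i + w)
--     # phase 2: only one side remains in range
--     if i > length - 1 - i:
--         for w in range(max(lo, 0) + 1, hi + 1):
--             yield (i - w,)
--     else:
--         for w in range(max(lo, 0) + 1, hi + 1):
--             yield (i + w,)
-- ===== Notes on version B (the rewrite author's own statement) =====
-- stated objective: alternative
-- what changed: Replaces the while-True loop with per-step boundary tests and tuple concatenation by a closed-form split into two bounded phases: a pair phase for widths up to min(i, length-1-i) yielding (i-w, i+w) with no conditionals, then a single-side tail phase up to max(i, length-1-i).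
import Mathlib
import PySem

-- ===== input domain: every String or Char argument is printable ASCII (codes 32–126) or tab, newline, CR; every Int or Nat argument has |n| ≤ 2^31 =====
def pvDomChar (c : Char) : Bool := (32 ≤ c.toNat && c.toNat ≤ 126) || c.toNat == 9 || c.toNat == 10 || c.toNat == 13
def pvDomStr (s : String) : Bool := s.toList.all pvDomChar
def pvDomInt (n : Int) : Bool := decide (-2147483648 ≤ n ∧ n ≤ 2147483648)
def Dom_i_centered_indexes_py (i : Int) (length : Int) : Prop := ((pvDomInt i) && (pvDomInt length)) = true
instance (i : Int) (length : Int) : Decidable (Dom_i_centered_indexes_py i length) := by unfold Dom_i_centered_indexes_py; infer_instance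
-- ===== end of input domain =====

-- B replaces A's while-True loop (per-step boundary tests, break when empty) by two bounded
-- phases: a pair phase up to min(i, length-1-i), then a one-sided tail up to max(i, length-1-i).

-- ===== PORT A =====
-- the while-True loop: to_return built by the two ifs; yield and continue if nonempty, else break.
-- fuel is only an upper bound on the iteration count (the loop body never sees it);
-- the loop always exits via the emptiness test before fuel runs out.
def pvALoop (i : Int) (length : Int) (width : Int) (fuel : Nat) : List (List Int) :=
  match fuel with
  | 0 => []
  | fuel + 1 =>
    let to_return : List Int :=
      (if i - width ≥ 0 then [i - width] else []) ++ (if i + width < length then [i + width] else [])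
    if to_return.length ≠ 0 then to_return :: pvALoop i length (width + 1) fuel else []

def i_centered_indexes_py (i : Int) (length : Int) : List (List Int) :=
  -- assert(length > 0): raises outside Pre_, here the loop is simply not entered
  if length > 0 then [i] :: pvALoop i length 1 ((max i (length - 1 - i)).toNat + 1) else []

-- ===== PORT B =====
def i_centered_indexes_py_alt (i : Int) (length : Int) : List (List Int) :=
  if length > 0 then
    let lo := min i (length - 1 - i)
    let hi := max i (length - 1 - i)
    let pairs := (PySem.List.pyRange 1 (lo + 1) 1).map (fun w => [i - w, i + w])
    let tail :=
      if i > length - 1 - i then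
        (PySem.List.pyRange (max lo 0 + 1) (hi + 1) 1).map (fun w => [i - w])
      else
        (PySem.List.pyRange (max lo 0 + 1) (hi + 1) 1).map (fun w => [i + w])
    [i] :: (pairs ++ tail)
  else []

-- ===== PRECONDITION & SPEC =====
-- A's assert(length > 0) raises AssertionError for length ≤ 0; exactly those inputs are excluded.
def Pre_i_centered_indexes_py (i : Int) (length : Int) : Prop := length > 0
instance (i : Int) (length : Int) : Decidable (Pre_i_centered_indexes_py i length) := by unfold Pre_i_centered_indexes_py; infer_instance
def pvWitness_i_centered_indexes_py : Int × Int := (2, 5)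

def Spec_i_centered_indexes_py (i : Int) (length : Int) (out : List (List Int)) : Prop := out = i_centered_indexes_py_alt i length
instance (i : Int) (length : Int) (out : List (List Int)) : Decidable (Spec_i_centered_indexes_py i length out) := by unfold Spec_i_centered_indexes_py; infer_instance

-- ===== CLAIM (what is proved, stated in full; the proofs are below) =====
def Claim_equal_i_centered_indexes_py : Prop := ∀ (i : Int) (length : Int), Dom_i_centered_indexes_py i length → Pre_i_centered_indexes_py i length → Spec_i_centered_indexes_py i length (i_centered_indexes_py i length)

-- ===== LEMMAS AND PROOFS =====

-- the step A's loop yields at a given width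
def pvStep (i : Int) (length : Int) (w : Int) : List Int :=
  (if i - w ≥ 0 then [i - w] else []) ++ (if i + w < length then [i + w] else [])

-- A's loop from any width is the map of pvStep over the remaining widths, given enough fuel
theorem pvALoop_eq (i length : Int) (fuel : Nat) (w : Int)
    (hf : (max i (length - 1 - i) + 1 - w).toNat < fuel) :
    pvALoop i length w fuel = (PySem.List.pyRange w (max i (length - 1 - i) + 1) 1).map (pvStep i length) := by
  induction fuel generalizing w with
  | zero => omega
  | succ fuel ih =>
    rw [pvALoop]
    by_cases hle : w ≤ max i (length - 1 - i)
    · have hne : ((if i - w ≥ 0 then [i - w] else []) ++ (if i + w < length then [i + w] else [])).length ≠ 0 := by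
        split_ifs with h1 h2 <;> simp <;> omega
      rw [if_pos hne, PySem.List.pyRange_one_cons (by omega), List.map_cons, ih (w + 1) (by omega)]
      rfl
    · have hemp : ((if i - w ≥ 0 then [i - w] else []) ++ (if i + w < length then [i + w] else [])).length = 0 := by
        split_ifs with h1 h2 <;> simp <;> omega
      rw [if_neg (by omega), PySem.List.pyRange_one_eq_nil (by omega), List.map_nil]

-- ===== VERDICT (by name: the statement is the Claim_ definition above) =====
theorem i_centered_indexes_py_spec : Claim_equal_i_centered_indexes_py := by
  intro i length _ hpre
  unfold Spec_i_centered_indexes_py i_centered_indexes_py i_centered_indexes_py_alt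
  have hl : length > 0 := hpre
  rw [if_pos hl, if_pos hl]
  simp only
  rw [pvALoop_eq i length _ 1 (by omega)]
  set lo := min i (length - 1 - i) with hlo
  set hi := max i (length - 1 - i) with hhi
  have hsplit : PySem.List.pyRange 1 (hi + 1) 1 =
      PySem.List.pyRange 1 (max lo 0 + 1) 1 ++ PySem.List.pyRange (max lo 0 + 1) (hi + 1) 1 := by
    apply PySem.List.pyRange_one_append <;> omega
  have hr : PySem.List.pyRange 1 (max lo 0 + 1) 1 = PySem.List.pyRange 1 (lo + 1) 1 := by
    rcases le_or_gt 0 lo with h | h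
    · rw [max_eq_left h]
    · rw [max_eq_right h.le, PySem.List.pyRange_one_eq_nil (by omega),
          PySem.List.pyRange_one_eq_nil (by omega)]
  rw [hr] at hsplit
  congr 1
  rw [hsplit, List.map_append]
  split_ifs with hgt <;> congr 1 <;> apply List.map_congr_left <;> intro w hw <;>
    rw [PySem.List.mem_pyRange_one] at hw <;> unfold pvStep
  · rw [if_pos (by omega), if_pos (by omega)]; rfl
  · rw [if_pos (by omega), if_neg (by omega)]; simp
  · rw [if_pos (by omega), if_pos (by omega)]; rfl
  · rw [if_neg (by omega), if_pos (by omega)]; rfl
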